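-- pv_equiv track=rewrite | github.com/Mathwesm/data-structures-and-algorithms | comparacao_alg_ordenacao/algoritimos_ordenacao.py | ordenacao_shell_comparacoes
-- ===== SOURCE A (Python) =====
-- def ordenacao_shell_comparacoes(arr):
--     comparacoes = 0
--     n = len(arr)
--     gap = n // 2
--     while gap > 0:
--         for i in range(gap, n):
--             temp = arr[i]
--             j = i
--             while j >= gap and arr[j - gap] > temp:
--                 comparacoes += 1
--                 arr[j] = arr[j - gap]
--                 j -= gap
--             arr[j] = temp
--         gap //= 2
--     return arr, comparacoes
-- ===== SOURCE B (Python) =====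
-- # Different decomposition: per gap, split into gap-spaced subsequences, count each
-- # subsequence's inversions (= insertion-sort shift count) via a maintained sorted
-- # prefix and binary search, sort it with sorted(), and splice the results back.
-- def _inversions(c):
--     total = 0
--     seen = []          # sorted list of the elements already passed
--     for x in c:
--         lo, hi = 0, len(seen)
--         while lo < hi:  # binary search: first position whose element is > x
--             mid = (lo + hi) // 2
--             if seen[mid] <= x:
--                 lo = mid + 1
--             else:
--                 hi = mid
--         total += len(seen) - lo
--         seen.insert(lo, x)
--     return total
--
-- def ordenacao_shell_comparacoes(arr):
--     comparacoes = 0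
--     n = len(arr)
--     gap = n // 2
--     while gap > 0:
--         chains = [arr[r::gap] for r in range(gap)]
--         for c in chains:
--             comparacoes += _inversions(c)
--         sorted_chains = [sorted(c) for c in chains]
--         arr[:] = [sorted_chains[idx % gap][idx // gap] for idx in range(n)]
--         gap //= 2
--     return arr, comparacoes
-- ===== Notes on version B (the rewrite author's own statement) =====
-- stated objective: alternative
-- what changed: Replaces the interleaved in-place gapped insertion sort by a per-gap decomposition into gap-spaced subsequences: each subsequence's shift count is obtained as its inversion count (binary-search insertion into a sorted prefix), the subsequence is sorted with sorted(), and the results are spliced back.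
import Mathlib
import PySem

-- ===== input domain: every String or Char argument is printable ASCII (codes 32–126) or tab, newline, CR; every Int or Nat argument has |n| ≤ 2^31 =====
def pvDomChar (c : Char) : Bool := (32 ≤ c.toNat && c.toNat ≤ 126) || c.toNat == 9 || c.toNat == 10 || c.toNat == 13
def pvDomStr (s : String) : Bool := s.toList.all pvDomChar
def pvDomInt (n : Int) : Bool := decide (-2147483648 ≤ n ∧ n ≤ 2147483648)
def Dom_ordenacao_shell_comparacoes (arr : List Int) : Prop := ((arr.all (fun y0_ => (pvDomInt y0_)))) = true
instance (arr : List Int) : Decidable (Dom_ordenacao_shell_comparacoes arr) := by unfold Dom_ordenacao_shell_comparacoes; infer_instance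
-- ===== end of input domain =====

-- B replaces the interleaved in-place gapped insertion sort by per-gap subsequence
-- decomposition (count inversions of each gap-spaced subsequence, sort it, splice back);
-- objective: alternative decomposition, equal return value. Python A and B both mutate
-- the argument list in place to the same final content; the theorems are about the return value.

-- ===== PORT A =====
-- all indices A uses are nonnegative and in range, so they are carried as Nat with
-- List.getD/List.set (exact on A's accesses)

-- inner 'while j >= gap and arr[j-gap] > temp'; the outer while guarantees 0 < gap
def pvInnerA (gap : Nat) (hg : 0 < gap) (temp : Int) : Nat → List Int → Int → List Int × Nat × Int
  | j, a, comp =>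
    if h : gap ≤ j ∧ a.getD (j - gap) 0 > temp then
      pvInnerA gap hg temp (j - gap) (a.set j (a.getD (j - gap) 0)) (comp + 1)
    else (a, j, comp)
  termination_by j => j
  decreasing_by exact Nat.sub_lt (Nat.lt_of_lt_of_le hg h.1) hg

-- body of 'for i in range(gap, n)'
def pvStepA (gap : Nat) (hg : 0 < gap) (st : List Int × Int) (i : Nat) : List Int × Int :=
  let temp := st.1.getD i 0
  let r := pvInnerA gap hg temp i st.1 st.2
  (r.1.set r.2.1 temp, r.2.2)

def pvPassA (gap n : Nat) (hg : 0 < gap) (st : List Int × Int) : List Int × Int :=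
  (List.range' gap (n - gap)).foldl (pvStepA gap hg) st

-- 'while gap > 0: …; gap //= 2'
def pvLoopA (n : Nat) : Nat → List Int × Int → List Int × Int
  | gap, st => if hg : 0 < gap then pvLoopA n (gap / 2) (pvPassA gap n hg st) else st

def ordenacao_shell_comparacoes (arr : List Int) : List Int × Int :=
  pvLoopA arr.length (arr.length / 2) (arr, 0)

-- ===== PORT B =====
-- number of q with q*gap + r < n (length of the extended slice arr[r::gap])
def pvCnt (gap r n : Nat) : Nat := (n - r + gap - 1) / gap

-- hand port of the extended slice arr[r::gap], exact for 0 ≤ r and step gap > 0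
def pvSlice (arr : List Int) (r gap : Nat) : List Int :=
  (List.range (pvCnt gap r arr.length)).map (fun q => arr.getD (q * gap + r) 0)

-- the 'while lo < hi' binary-search loop of _inversions
def pvBis (seen : List Int) (x : Int) : Nat → Nat → Nat
  | lo, hi =>
    if h : lo < hi then
      if seen.getD ((lo + hi) / 2) 0 ≤ x then pvBis seen x ((lo + hi) / 2 + 1) hi
      else pvBis seen x lo ((lo + hi) / 2)
    else lo
  termination_by lo hi => hi - lo
  decreasing_by all_goals omega

-- _inversions(c)
def pvInversionsAlt (c : List Int) : Int :=
  (c.foldl (fun (st : Int × List Int) x =>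
      ((st.1 + ((st.2.length : Int) - ((pvBis st.2 x 0 st.2.length : Nat) : Int))),
        PySem.List.insert st.2 ((pvBis st.2 x 0 st.2.length : Nat) : Int) x))
    ((0 : Int), ([] : List Int))).1

-- one 'while gap > 0' body of B
def pvPassB (gap n : Nat) (arr : List Int) (comp : Int) : List Int × Int :=
  let chains := (List.range gap).map (fun r => pvSlice arr r gap)
  let comp2 := chains.foldl (fun c ch => c + pvInversionsAlt ch) comp
  let schains := chains.map (fun c => PySem.List.sorted c (fun x => x) false)
  ((List.range n).map (fun idx => (schains.getD (idx % gap) []).getD (idx / gap) 0), comp2)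

def pvLoopB (n : Nat) : Nat → List Int × Int → List Int × Int
  | gap, st => if 0 < gap then pvLoopB n (gap / 2) (pvPassB gap n st.1 st.2) else st

def ordenacao_shell_comparacoes_alt (arr : List Int) : List Int × Int :=
  pvLoopB arr.length (arr.length / 2) (arr, 0)

-- ===== PRECONDITION & SPEC =====
def Spec_ordenacao_shell_comparacoes (arr : List Int) (out : List Int × Int) : Prop := out = ordenacao_shell_comparacoes_alt arr
instance (arr : List Int) (out : List Int × Int) : Decidable (Spec_ordenacao_shell_comparacoes arr out) := by unfold Spec_ordenacao_shell_comparacoes; infer_instance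

-- ===== CLAIM (what is proved, stated in full; the proofs are below) =====
def Claim_equal_ordenacao_shell_comparacoes : Prop := ∀ (arr : List Int), Dom_ordenacao_shell_comparacoes arr → Spec_ordenacao_shell_comparacoes arr (ordenacao_shell_comparacoes arr)

-- ===== LEMMAS AND PROOFS =====

-- sorted insertion of x into s: before the first element greater than x
def insL (s : List Int) (x : Int) : List Int :=
  s.takeWhile (fun y => !decide (x < y)) ++ x :: s.dropWhile (fun y => !decide (x < y))

-- insertion sort, left to right
def isortL (c : List Int) : List Int := c.foldl insL []

-- proof-side canonical inversion counter: sum over each element of the number of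
-- strictly greater elements before it
def pvInvInner (x : Int) (t : Int) (seen : List Int) : Int :=
  seen.foldl (fun t y => if y > x then t + 1 else t) t

def pvInversions (c : List Int) : Int :=
  (c.foldl (fun (st : Int × List Int) x => (pvInvInner x st.1 st.2, st.2 ++ [x])) ((0 : Int), ([] : List Int))).1

theorem pvCnt_iff {gap r : Nat} (hg : 0 < gap) (hr : r < gap) (n q : Nat) :
    q * gap + r < n ↔ q < pvCnt gap r n := by
  unfold pvCnt
  constructor
  · intro h
    have h2 : q + 1 ≤ (n - r + gap - 1) / gap := by
      rw [Nat.le_div_iff_mul_le hg, Nat.succ_mul]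
      generalize q * gap = k at h ⊢
      omega
    omega
  · intro h
    have h2 : (q + 1) * gap ≤ n - r + gap - 1 := (Nat.le_div_iff_mul_le hg).mp h
    rw [Nat.succ_mul] at h2
    generalize q * gap = k at h2 ⊢
    omega

theorem pvCnt_eq {gap r : Nat} (hg : 0 < gap) (hr : r < gap) {n m : Nat}
    (h : ∀ q, q * gap + r < n ↔ q < m) : pvCnt gap r n = m := by
  rcases Nat.lt_trichotomy (pvCnt gap r n) m with hlt | he | hgt
  · have h1 := (h (pvCnt gap r n)).mpr hlt
    have := (pvCnt_iff hg hr n (pvCnt gap r n)).mp h1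
    omega
  · exact he
  · have h1 := (pvCnt_iff hg hr n m).mpr hgt
    have := (h m).mp h1
    omega

theorem length_pvSlice (arr : List Int) (r gap : Nat) :
    (pvSlice arr r gap).length = pvCnt gap r arr.length := by
  simp [pvSlice]

theorem getD_pvSlice {arr : List Int} {r gap q : Nat} (hq : q < pvCnt gap r arr.length) :
    (pvSlice arr r gap).getD q 0 = arr.getD (q * gap + r) 0 := by
  simp [pvSlice, List.getD, List.getElem?_map, List.getElem?_range, hq]

theorem idx_eq_iff {gap r r' q q' : Nat} (hg : 0 < gap) (hr : r < gap) (hr' : r' < gap) :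
    q' * gap + r' = q * gap + r ↔ (q' = q ∧ r' = r) := by
  constructor
  · intro h
    have h2 : (q' * gap + r') % gap = (q * gap + r) % gap := by rw [h]
    rw [Nat.add_comm (q' * gap) r', Nat.add_comm (q * gap) r, Nat.add_mul_mod_self_right,
        Nat.add_mul_mod_self_right, Nat.mod_eq_of_lt hr', Nat.mod_eq_of_lt hr] at h2
    subst h2
    have : q' * gap = q * gap := by omega
    exact ⟨Nat.eq_of_mul_eq_mul_right hg this, rfl⟩
  · rintro ⟨rfl, rfl⟩; rfl

theorem getD_append_length (xs : List Int) (y : Int) (ys : List Int) :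
    (xs ++ y :: ys).getD xs.length 0 = y := by
  induction xs with
  | nil => rfl
  | cons a l ih => simpa using ih

theorem set_append_length (xs : List Int) (y b : Int) (ys : List Int) :
    (xs ++ y :: ys).set xs.length b = xs ++ b :: ys := by
  induction xs with
  | nil => rfl
  | cons a l ih => simpa using ih

theorem getD_map_range {α : Type} {f : Nat → α} {m q : Nat} (hq : q < m) (d : α) :
    ((List.range m).map f).getD q d = f q := by
  simp [List.getD, hq]

theorem pvSlice_set {arr : List Int} {gap r r' q : Nat} (hg : 0 < gap) (hr : r < gap)
    (hr' : r' < gap) (hi : q * gap + r < arr.length) (v : Int) :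
    pvSlice (arr.set (q * gap + r) v) r' gap =
      if r' = r then (pvSlice arr r' gap).set q v else pvSlice arr r' gap := by
  have hl : (arr.set (q * gap + r) v).length = arr.length := by simp
  have hq : q < pvCnt gap r arr.length := (pvCnt_iff hg hr _ q).mp hi
  by_cases hrr : r' = r
  · subst hrr
    rw [if_pos rfl]
    apply List.ext_getElem
    · simp [pvSlice, hl]
    · intro i h1 h2
      simp only [pvSlice, hl, List.length_map, List.length_range] at h1
      simp only [pvSlice, hl, List.getElem_map, List.getElem_range]
      have hii : i * gap + r' < arr.length := (pvCnt_iff hg hr' _ i).mpr h1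
      rw [List.getElem_set]
      rw [List.getD_eq_getElem _ _ (by simpa [hl] using hii),
          List.getElem_set]
      by_cases hiq : q = i
      · subst hiq
        simp
      · have hne : ¬ (q * gap + r' = i * gap + r') := by
          intro hcon
          exact hiq ((idx_eq_iff hg hr' hr').mp hcon.symm).1.symm
        rw [if_neg hiq, if_neg hne, ← List.getD_eq_getElem _ 0 hii]
        simp [h1]
  · rw [if_neg hrr]
    apply List.ext_getElem
    · simp [pvSlice, hl]
    · intro i h1 h2
      simp only [pvSlice, hl, List.length_map, List.length_range] at h1
      simp only [pvSlice, hl, List.getElem_map, List.getElem_range]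
      have hii : i * gap + r' < arr.length := (pvCnt_iff hg hr' _ i).mpr h1
      have hne : ¬ (q * gap + r = i * gap + r') := by
        intro hcon
        exact hrr ((idx_eq_iff (r := r') (r' := r) (q := i) (q' := q) hg hr' hr).mp hcon).2.symm
      rw [List.getD_eq_getElem _ _ (by simpa [hl] using hii), List.getElem_set,
          if_neg hne, ← List.getD_eq_getElem _ 0 hii]

-- folding the if-counter = countP
theorem pvInvInner_eq (x t : Int) (seen : List Int) :
    pvInvInner x t seen = t + (seen.countP (fun y => decide (x < y)) : Int) := by
  induction seen generalizing t with
  | nil => simp [pvInvInner]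
  | cons y ys ih =>
    simp only [pvInvInner, List.foldl_cons] at *
    rw [ih]
    by_cases h : x < y <;> simp [List.countP_cons, h, gt_iff_lt] <;> ring

theorem pvInversions_state (c : List Int) (t : Int) (seen : List Int) :
    (c.foldl (fun (st : Int × List Int) x => (pvInvInner x st.1 st.2, st.2 ++ [x])) (t, seen)).2
      = seen ++ c := by
  induction c generalizing t seen with
  | nil => simp
  | cons x xs ih => simp [List.foldl_cons, ih]

theorem pvInversions_snoc (p : List Int) (x : Int) :
    pvInversions (p ++ [x]) = pvInversions p + (p.countP (fun y => decide (x < y)) : Int) := by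
  unfold pvInversions
  rw [List.foldl_append]
  have h2 := pvInversions_state p 0 []
  simp only [List.nil_append] at h2
  rcases he : (p.foldl (fun (st : Int × List Int) x => (pvInvInner x st.1 st.2, st.2 ++ [x])) ((0:Int), ([]:List Int))) with ⟨a, b⟩
  rw [he] at h2
  simp only [List.foldl_cons, List.foldl_nil]
  simp only at h2
  subst h2
  simp [pvInvInner_eq]

theorem pvInversions_singleton (x : Int) : pvInversions [x] = 0 := by
  simp [pvInversions, pvInvInner]

-- the shifting run of the inner while loop, seen through the chain r
theorem pvInnerA_run (gap : Nat) (hg : 0 < gap) (x : Int) :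
    ∀ (g p : List Int) (v : Int) (t : List Int) (r : Nat) (arr : List Int) (comp : Int),
    r < gap → (p.length + g.length) * gap + r < arr.length →
    pvSlice arr r gap = p ++ g ++ v :: t →
    (∀ y ∈ g, x < y) → (∀ y ∈ p, ¬ x < y) →
    ∃ arr', pvInnerA gap hg x ((p.length + g.length) * gap + r) arr comp
        = (arr', p.length * gap + r, comp + (g.length : Int)) ∧
      arr'.length = arr.length ∧
      pvSlice arr' r gap = p ++ g.headD v :: g ++ t ∧
      (∀ r' < gap, r' ≠ r → pvSlice arr' r' gap = pvSlice arr r' gap) := by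
  intro g
  induction g using List.reverseRecOn with
  | nil =>
    intro p v t r arr comp hr hlen hchain hgall hpall
    have hcond : ¬ (gap ≤ (p.length + ([] : List Int).length) * gap + r ∧
        arr.getD ((p.length + ([] : List Int).length) * gap + r - gap) 0 > x) := by
      intro hc
      rcases List.eq_nil_or_concat p with rfl | ⟨p', z, hp⟩
      · simp only [List.length_nil, Nat.add_zero, Nat.zero_mul, Nat.zero_add] at hc
        omega
      · subst hp
        simp only [List.concat_eq_append, List.length_append, List.length_cons,
          List.length_nil, List.append_nil, Nat.add_zero] at hc hlen hchain hpall
        have h1 : (p'.length + 1) * gap = p'.length * gap + gap := by ring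
        have hlp : p'.length * gap + r < arr.length := by omega
        have hcnt : p'.length < pvCnt gap r arr.length := (pvCnt_iff hg hr _ _).mp hlp
        have hz : arr.getD (p'.length * gap + r) 0 = z := by
          rw [← getD_pvSlice hcnt, hchain]
          have h2 : p' ++ [z] ++ v :: t = p' ++ z :: (v :: t) := by simp
          rw [h2, getD_append_length]
        have hidx : (p'.length + 1) * gap + r - gap = p'.length * gap + r := by omega
        rw [hidx, hz] at hc
        exact hpall z (by simp) hc.2
    refine ⟨arr, ?_, rfl, by simpa using hchain, fun r' _ _ => rfl⟩
    rw [pvInnerA, dif_neg hcond]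
    simp
  | append_singleton g' b ih =>
    intro p v t r arr comp hr hlen hchain hgall hpall
    have hb : x < b := hgall b (by simp)
    have hmul : (p.length + (g' ++ [b]).length) * gap
        = (p.length + g'.length) * gap + gap := by
      simp only [List.length_append, List.length_cons, List.length_nil]
      ring
    have hlen' : (p.length + g'.length) * gap + r < arr.length := by omega
    have hcnt : p.length + g'.length < pvCnt gap r arr.length :=
      (pvCnt_iff hg hr _ _).mp hlen'
    have hgetb : arr.getD ((p.length + g'.length) * gap + r) 0 = b := by
      rw [← getD_pvSlice hcnt, hchain]
      have : p ++ (g' ++ [b]) ++ v :: t = (p ++ g') ++ b :: (v :: t) := by simp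
      rw [this]
      have hL : (p ++ g').length = p.length + g'.length := by simp
      rw [← hL, getD_append_length]
    have hidx : (p.length + (g' ++ [b]).length) * gap + r - gap
        = (p.length + g'.length) * gap + r := by omega
    have hcond : gap ≤ (p.length + (g' ++ [b]).length) * gap + r ∧
        arr.getD ((p.length + (g' ++ [b]).length) * gap + r - gap) 0 > x := by
      refine ⟨by omega, ?_⟩
      rw [hidx, hgetb]
      exact hb
    -- the array after one shift
    have hsetidx : (p.length + (g' ++ [b]).length) * gap + r
        = (p.length + g'.length + 1) * gap + r := by
      have h : p.length + (g' ++ [b]).length = p.length + g'.length + 1 := by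
        simp only [List.length_append, List.length_cons, List.length_nil]
        omega
      rw [h]
    set arr2 := arr.set ((p.length + (g' ++ [b]).length) * gap + r)
        (arr.getD ((p.length + (g' ++ [b]).length) * gap + r - gap) 0) with harr2
    have hlen2 : arr2.length = arr.length := by simp [harr2]
    have hchain2 : pvSlice arr2 r gap = p ++ g' ++ b :: (b :: t) := by
      rw [harr2, hidx, hgetb, hsetidx,
          pvSlice_set hg hr hr (by omega) b, if_pos rfl, hchain]
      have h1 : p ++ (g' ++ [b]) ++ v :: t = (p ++ g' ++ [b]) ++ v :: t := by simp
      have h2 : p.length + g'.length + 1 = (p ++ g' ++ [b]).length := by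
        simp only [List.length_append, List.length_cons, List.length_nil]
      rw [h1, h2, set_append_length]
      simp
    obtain ⟨arr', heq, hlenf, hchainf, hothf⟩ :=
      ih p b (b :: t) r arr2 (comp + 1) hr (by omega) hchain2 (fun y hy => hgall y (by simp [hy]))
        hpall
    refine ⟨arr', ?_, by omega, ?_, ?_⟩
    · rw [pvInnerA, dif_pos hcond, ← harr2, hidx, heq]
      have : comp + 1 + (g'.length : Int) = comp + ((g' ++ [b]).length : Int) := by
        simp only [List.length_append, List.length_cons, List.length_nil]
        push_cast
        ring
      rw [this]
    · rw [hchainf]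
      cases g' <;> simp
    · intro r' hr' hne
      rw [hothf r' hr' hne, harr2, hidx, hgetb, hsetidx,
          pvSlice_set hg hr hr' (by omega) b, if_neg hne]

theorem dropWhile_gt {x : Int} : ∀ {s : List Int}, s.Pairwise (· ≤ ·) →
    ∀ y ∈ s.dropWhile (fun y => !decide (x < y)), x < y := by
  intro s
  induction s with
  | nil => intro _; simp
  | cons a l ih =>
    intro hs y hy
    rw [List.pairwise_cons] at hs
    rw [List.dropWhile_cons] at hy
    by_cases h : x < a
    · rw [if_neg (by simp [h])] at hy
      rcases List.mem_cons.mp hy with rfl | hy2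
      · exact h
      · exact lt_of_lt_of_le h (hs.1 y hy2)
    · rw [if_pos (by simp [h])] at hy
      exact ih hs.2 y hy

theorem insL_perm (s : List Int) (x : Int) : (insL s x).Perm (x :: s) := by
  unfold insL
  have h := List.perm_middle (a := x) (l₁ := s.takeWhile (fun y => !decide (x < y)))
      (l₂ := s.dropWhile (fun y => !decide (x < y)))
  simpa [List.takeWhile_append_dropWhile] using h

theorem insL_pairwise {s : List Int} (x : Int) (hs : s.Pairwise (· ≤ ·)) :
    (insL s x).Pairwise (· ≤ ·) := by
  have hd := dropWhile_gt (x := x) hs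
  have hsplit : s.takeWhile (fun y => !decide (x < y)) ++ s.dropWhile (fun y => !decide (x < y)) = s :=
    List.takeWhile_append_dropWhile
  have hs2 := hs
  rw [← hsplit, List.pairwise_append] at hs2
  obtain ⟨hT, hD, hTD⟩ := hs2
  unfold insL
  rw [List.pairwise_append]
  refine ⟨hT, ?_, ?_⟩
  · rw [List.pairwise_cons]
    exact ⟨fun y hy => le_of_lt (hd y hy), hD⟩
  · intro a ha b hb
    rcases List.mem_cons.mp hb with rfl | hb2
    · have := List.mem_takeWhile_imp ha
      simp only [Bool.not_eq_eq_eq_not, Bool.not_true, decide_eq_false_iff_not] at this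
      exact le_of_not_gt this
    · exact hTD a ha b hb2

theorem countP_gt_eq {s : List Int} (x : Int) (hs : s.Pairwise (· ≤ ·)) :
    s.countP (fun y => decide (x < y)) = (s.dropWhile (fun y => !decide (x < y))).length := by
  conv_lhs => rw [← List.takeWhile_append_dropWhile (p := fun y => !decide (x < y)) (l := s)]
  rw [List.countP_append]
  have h1 : (s.takeWhile (fun y => !decide (x < y))).countP (fun y => decide (x < y)) = 0 := by
    rw [List.countP_eq_zero]
    intro a ha
    have := List.mem_takeWhile_imp ha
    simpa using this
  have h2 : (s.dropWhile (fun y => !decide (x < y))).countP (fun y => decide (x < y))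
      = (s.dropWhile (fun y => !decide (x < y))).length := by
    rw [List.countP_eq_length]
    intro a ha
    simpa using dropWhile_gt hs a ha
  omega

theorem isortL_append_singleton (c : List Int) (x : Int) :
    isortL (c ++ [x]) = insL (isortL c) x := by
  simp [isortL, List.foldl_append]

theorem isortL_perm (c : List Int) : (isortL c).Perm c := by
  induction c using List.reverseRecOn with
  | nil => simp [isortL]
  | append_singleton l a ih =>
    rw [isortL_append_singleton]
    refine ((insL_perm _ a).trans (ih.cons a)).trans ?_
    simpa using (List.perm_middle (a := a) (l₁ := l) (l₂ := ([] : List Int))).symm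

theorem isortL_pairwise (c : List Int) : (isortL c).Pairwise (· ≤ ·) := by
  induction c using List.reverseRecOn with
  | nil => simp [isortL]
  | append_singleton l a ih =>
    rw [isortL_append_singleton]
    exact insL_pairwise a ih

theorem isortL_length (c : List Int) : (isortL c).length = c.length :=
  (isortL_perm c).length_eq

theorem foldl_add_range (m : Nat) (f : Nat → Int) (init : Int) :
    (List.range m).foldl (fun c r => c + f r) init = init + ∑ r ∈ Finset.range m, f r := by
  induction m with
  | zero => simp
  | succ m ih =>
    rw [List.range_succ, List.foldl_append, Finset.sum_range_succ, ih]
    simp only [List.foldl_cons, List.foldl_nil]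
    ring

-- the invariant carried over the 'for i in range(gap, n)' loop of A's pass
theorem pvPassA_inv (gap n : Nat) (hg : 0 < gap) (hn : 2 * gap ≤ n)
    (arr0 : List Int) (comp0 : Int) (hlen0 : arr0.length = n) :
    ∀ k, gap ≤ k → k ≤ n →
    ∃ a, (List.range' gap (k - gap)).foldl (pvStepA gap hg) (arr0, comp0)
        = (a, comp0 + ∑ r ∈ Finset.range gap,
            pvInversions ((pvSlice arr0 r gap).take (pvCnt gap r k))) ∧
      a.length = n ∧
      (∀ r, r < gap → pvSlice a r gap
          = isortL ((pvSlice arr0 r gap).take (pvCnt gap r k))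
            ++ (pvSlice arr0 r gap).drop (pvCnt gap r k)) := by
  intro k hk1
  induction k, hk1 using Nat.le_induction with
  | base =>
    intro _
    have hcnt1 : ∀ r, r < gap → pvCnt gap r gap = 1 := by
      intro r hr
      apply pvCnt_eq hg hr
      intro q
      constructor
      · intro h
        by_contra hq
        have h1 : 1 ≤ q := by omega
        have h2 : gap ≤ q * gap := Nat.le_mul_of_pos_left gap (by omega)
        omega
      · intro h
        have : q = 0 := by omega
        subst this
        simpa using hr
    have hne : ∀ r, r < gap → ∃ h tl, pvSlice arr0 r gap = h :: tl := by
      intro r hr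
      have hlen : 0 < (pvSlice arr0 r gap).length := by
        rw [length_pvSlice, hlen0]
        have := (pvCnt_iff hg hr n 0).mp (by simpa using lt_of_lt_of_le hr (by omega))
        omega
      obtain ⟨h, tl, hc⟩ := List.exists_cons_of_ne_nil (List.ne_nil_of_length_pos hlen)
      exact ⟨h, tl, hc⟩
    refine ⟨arr0, ?_, hlen0, ?_⟩
    · simp only [Nat.sub_self, List.range'_zero, List.foldl_nil]
      have hz : ∀ r ∈ Finset.range gap,
          pvInversions ((pvSlice arr0 r gap).take (pvCnt gap r gap)) = 0 := by
        intro r hr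
        rw [Finset.mem_range] at hr
        obtain ⟨h, tl, hc⟩ := hne r hr
        rw [hcnt1 r hr, hc]
        simpa using pvInversions_singleton h
      rw [Finset.sum_congr rfl hz]
      simp
    · intro r hr
      obtain ⟨h, tl, hc⟩ := hne r hr
      rw [hcnt1 r hr, hc]
      simp [isortL, insL]
  | succ k hk ih =>
    intro hk2
    obtain ⟨a, hfold, hlena, hch⟩ := ih (by omega)
    have hr0 : k % gap < gap := Nat.mod_lt _ hg
    have hkeq : (k / gap) * gap + k % gap = k := by
      have h := Nat.div_add_mod k gap
      rw [Nat.mul_comm] at h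
      omega
    have hq1 : 1 ≤ k / gap := (Nat.one_le_div_iff hg).mpr hk
    set r0 := k % gap with hr0def
    set q := k / gap with hqdef
    have hmul_lt : ∀ q' q'' : Nat, q' * gap < q'' * gap ↔ q' < q'' := by
      intro q' q''
      exact Nat.mul_lt_mul_right hg
    have hcntk : pvCnt gap r0 k = q := by
      apply pvCnt_eq hg hr0
      intro q'
      have := hmul_lt q' q
      omega
    have hcntk1 : pvCnt gap r0 (k + 1) = q + 1 := by
      apply pvCnt_eq hg hr0
      intro q'
      have h1 := hmul_lt q' q
      have h2 := hmul_lt q q'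
      omega
    have hcntr' : ∀ r', r' < gap → r' ≠ r0 → pvCnt gap r' (k + 1) = pvCnt gap r' k := by
      intro r' hr' hne
      apply pvCnt_eq hg hr'
      intro q'
      have hiff := pvCnt_iff hg hr' k q'
      have hneq : q' * gap + r' ≠ k := by
        intro hcon
        rw [← hkeq] at hcon
        exact hne ((idx_eq_iff hg hr0 hr').mp hcon).2
      omega
    set c0 := pvSlice arr0 r0 gap with hc0def
    have hc0len : c0.length = pvCnt gap r0 n := by rw [hc0def, length_pvSlice, hlen0]
    have hqc0 : q < c0.length := by
      rw [hc0len]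
      exact (pvCnt_iff hg hr0 n q).mp (by omega)
    set x := c0[q]'hqc0 with hxdef
    have htake : c0.take (q + 1) = c0.take q ++ [x] := by
      rw [List.take_succ]
      simp [List.getElem?_eq_getElem hqc0, hxdef]
    set S := isortL (c0.take q) with hSdef
    have hSlen : S.length = q := by
      rw [hSdef, isortL_length, List.length_take]
      omega
    have hdropq : c0.drop q = x :: c0.drop (q + 1) := List.drop_eq_getElem_cons hqc0
    have hchr0 : pvSlice a r0 gap = S ++ (x :: c0.drop (q + 1)) := by
      rw [hch r0 hr0, hcntk, ← hSdef, ← hdropq]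
    -- temp = x
    have hcnta : q < pvCnt gap r0 a.length := by rw [hlena]; rw [hc0len] at hqc0; exact hqc0
    have htemp : a.getD k 0 = x := by
      rw [← hkeq, ← getD_pvSlice hcnta, hchr0, ← hSlen, getD_append_length]
    -- split S
    set P := S.takeWhile (fun y => !decide (x < y)) with hPdef
    set G := S.dropWhile (fun y => !decide (x < y)) with hGdef
    have hPS : P ++ G = S := List.takeWhile_append_dropWhile
    have hSsorted : S.Pairwise (· ≤ ·) := isortL_pairwise _
    have hGall : ∀ y ∈ G, x < y := dropWhile_gt hSsorted
    have hPall : ∀ y ∈ P, ¬ x < y := by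
      intro y hy
      have := List.mem_takeWhile_imp hy
      simpa using this
    have hPGlen : P.length + G.length = q := by
      have : (P ++ G).length = S.length := by rw [hPS]
      simp only [List.length_append] at this
      omega
    have hchsplit : pvSlice a r0 gap = P ++ G ++ x :: c0.drop (q + 1) := by
      rw [hchr0, ← hPS]
    have hkbound : (P.length + G.length) * gap + r0 < a.length := by
      rw [hPGlen, hkeq, hlena]
      omega
    obtain ⟨arr', heq, hlen', hchain', hoth⟩ :=
      pvInnerA_run gap hg x G P x (c0.drop (q + 1)) r0 a
        (comp0 + ∑ r ∈ Finset.range gap,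
          pvInversions ((pvSlice arr0 r gap).take (pvCnt gap r k)))
        hr0 hkbound hchsplit hGall hPall
    -- the new array
    refine ⟨arr'.set (P.length * gap + r0) x, ?_, ?_, ?_⟩
    · -- the fold equation
      have hrange : k + 1 - gap = (k - gap) + 1 := by omega
      have hsplitr : List.range' gap (k + 1 - gap) = List.range' gap (k - gap) ++ [k] := by
        rw [hrange, List.range'_1_concat]
        have : gap + (k - gap) = k := by omega
        rw [this]
      rw [hsplitr, List.foldl_append, hfold]
      simp only [List.foldl_cons, List.foldl_nil]
      unfold pvStepA
      simp only [htemp]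
      have heq' := heq
      rw [show (P.length + G.length) * gap + r0 = k from by rw [hPGlen, hkeq]] at heq'
      rw [heq']
      -- now the comp component
      have hcount : (G.length : Int) = ((c0.take q).countP (fun y => decide (x < y)) : Int) := by
        have h1 : S.countP (fun y => decide (x < y)) = G.length := countP_gt_eq x hSsorted
        have h2 : S.countP (fun y => decide (x < y)) = (c0.take q).countP (fun y => decide (x < y)) :=
          (isortL_perm (c0.take q)).countP_eq _
        omega
      have hsum : ∑ r ∈ Finset.range gap, pvInversions ((pvSlice arr0 r gap).take (pvCnt gap r (k + 1)))
          = (∑ r ∈ Finset.range gap, pvInversions ((pvSlice arr0 r gap).take (pvCnt gap r k)))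
            + ((c0.take q).countP (fun y => decide (x < y)) : Int) := by
        rw [← Finset.add_sum_erase _ _ (Finset.mem_range.mpr hr0),
            ← Finset.add_sum_erase _ _ (Finset.mem_range.mpr hr0)]
        have hrest : ∑ r ∈ (Finset.range gap).erase r0,
              pvInversions ((pvSlice arr0 r gap).take (pvCnt gap r (k + 1)))
            = ∑ r ∈ (Finset.range gap).erase r0,
              pvInversions ((pvSlice arr0 r gap).take (pvCnt gap r k)) := by
          apply Finset.sum_congr rfl
          intro r' hr'
          rw [Finset.mem_erase] at hr'
          rw [hcntr' r' (Finset.mem_range.mp hr'.2) hr'.1]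
        rw [hrest, hcntk, hcntk1, ← hc0def, htake, pvInversions_snoc]
        ring
      congr 1
      rw [hsum, ← hcount]
      ring
    · simp [hlen', hlena]
    · intro r' hr'
      have hsetb : P.length * gap + r0 < arr'.length := by
        have h1 : P.length * gap ≤ (P.length + G.length) * gap :=
          Nat.mul_le_mul_right gap (by omega)
        have h2 := hkbound
        rw [hlen']
        omega
      by_cases hne : r' = r0
      · subst hne
        rw [pvSlice_set hg hr' hr' hsetb x, if_pos rfl, hchain']
        have hh : P ++ G.headD x :: G ++ c0.drop (q + 1)
            = P ++ (G.headD x :: (G ++ c0.drop (q + 1))) := by simp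
        rw [hh, set_append_length]
        rw [hcntk1, ← hc0def, htake, isortL_append_singleton, ← hSdef]
        unfold insL
        rw [← hPdef, ← hGdef]
        simp
      · rw [pvSlice_set hg hr0 hr' hsetb x, if_neg hne, hoth r' hr' hne, hch r' hr',
            hcntr' r' hr' hne]

theorem getD_mono {seen : List Int} (hs : seen.Pairwise (· ≤ ·)) {i j : Nat}
    (hij : i ≤ j) (hj : j < seen.length) : seen.getD i 0 ≤ seen.getD j 0 := by
  rcases Nat.eq_or_lt_of_le hij with rfl | hlt
  · exact le_refl _
  · rw [List.getD_eq_getElem _ _ (by omega), List.getD_eq_getElem _ _ hj]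
    exact List.pairwise_iff_getElem.mp hs i j (by omega) hj hlt

theorem pvBis_spec (seen : List Int) (x : Int) (hs : seen.Pairwise (· ≤ ·)) :
    ∀ (d lo hi : Nat), hi - lo = d → lo ≤ hi → hi ≤ seen.length →
    (∀ i, i < lo → seen.getD i 0 ≤ x) →
    (∀ i, hi ≤ i → i < seen.length → x < seen.getD i 0) →
    lo ≤ pvBis seen x lo hi ∧ pvBis seen x lo hi ≤ hi ∧
    (∀ i, i < pvBis seen x lo hi → seen.getD i 0 ≤ x) ∧
    (∀ i, pvBis seen x lo hi ≤ i → i < seen.length → x < seen.getD i 0) := by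
  intro d
  induction d using Nat.strong_induction_on with
  | _ d ih =>
    intro lo hi hd hlohi hhilen hlow hhigh
    rw [pvBis]
    by_cases h : lo < hi
    · rw [dif_pos h]
      by_cases hle : seen.getD ((lo + hi) / 2) 0 ≤ x
      · rw [if_pos hle]
        have hrec := ih (hi - ((lo + hi) / 2 + 1)) (by omega) ((lo + hi) / 2 + 1) hi rfl
          (by omega) hhilen ?_ hhigh
        · exact ⟨by omega, hrec.2.1, hrec.2.2.1, hrec.2.2.2⟩
        · intro i hi2
          by_cases hilo : i < lo
          · exact hlow i hilo
          · exact le_trans (getD_mono hs (by omega) (by omega)) hle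
      · rw [if_neg hle]
        have hrec := ih ((lo + hi) / 2 - lo) (by omega) lo ((lo + hi) / 2) rfl
          (by omega) (by omega) hlow ?_
        · exact ⟨hrec.1, by omega, hrec.2.2.1, hrec.2.2.2⟩
        · intro i him hilen
          by_cases hih : hi ≤ i
          · exact hhigh i hih hilen
          · exact lt_of_lt_of_le (lt_of_not_ge hle) (getD_mono hs him hilen)
    · rw [dif_neg h]
      exact ⟨le_refl _, hlohi, hlow, fun i hi1 hi2 => hhigh i (by omega) hi2⟩

theorem pvBis_eq (seen : List Int) (x : Int) (hs : seen.Pairwise (· ≤ ·)) :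
    pvBis seen x 0 seen.length = (seen.takeWhile (fun y => !decide (x < y))).length := by
  obtain ⟨_, hble, hlow, hhigh⟩ := pvBis_spec seen x hs (seen.length - 0) 0 seen.length rfl
    (by omega) (le_refl _) (by omega) (by omega)
  set b := pvBis seen x 0 seen.length
  set P := seen.takeWhile (fun y => !decide (x < y)) with hPdef
  set G := seen.dropWhile (fun y => !decide (x < y)) with hGdef
  have hPS : P ++ G = seen := List.takeWhile_append_dropWhile
  have hPlen : P.length ≤ seen.length := by
    rw [← hPS]
    simp
  rcases Nat.lt_trichotomy b P.length with hlt | he | hgt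
  · exfalso
    have hblen : b < seen.length := by omega
    have hxb : x < seen.getD b 0 := hhigh b (le_refl b) hblen
    have hmem : seen.getD b 0 ∈ P := by
      rw [← hPS, List.getD_eq_getElem _ _ (by rw [hPS]; exact hblen),
          List.getElem_append_left hlt]
      exact List.getElem_mem _
    have := List.mem_takeWhile_imp hmem
    simp only [Bool.not_eq_eq_eq_not, Bool.not_true, decide_eq_false_iff_not] at this
    exact this hxb
  · exact he
  · exfalso
    have hGne : G.length > 0 := by
      have : P.length + G.length = seen.length := by
        rw [← List.length_append, hPS]
      omega
    obtain ⟨g0, G', hG⟩ := List.exists_cons_of_ne_nil (List.ne_nil_of_length_pos hGne)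
    have hg0 : seen.getD P.length 0 = g0 := by
      rw [← hPS, hG, getD_append_length]
    have hle : seen.getD P.length 0 ≤ x := hlow P.length hgt
    have hmem : g0 ∈ G := by rw [hG]; simp
    have := dropWhile_gt hs g0 hmem
    rw [hg0] at hle
    omega

theorem pvInvAlt_state : ∀ (c p : List Int),
    (c.foldl (fun (st : Int × List Int) x =>
        ((st.1 + ((st.2.length : Int) - ((pvBis st.2 x 0 st.2.length : Nat) : Int))),
          PySem.List.insert st.2 ((pvBis st.2 x 0 st.2.length : Nat) : Int) x))
      (pvInversions p, isortL p))
    = (pvInversions (p ++ c), isortL (p ++ c)) := by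
  intro c
  induction c with
  | nil => intro p; simp
  | cons x xs ih =>
    intro p
    rw [List.foldl_cons]
    set seen := isortL p with hseen
    have hs : seen.Pairwise (· ≤ ·) := isortL_pairwise _
    set P := seen.takeWhile (fun y => !decide (x < y)) with hPdef
    set G := seen.dropWhile (fun y => !decide (x < y)) with hGdef
    have hPS : P ++ G = seen := List.takeWhile_append_dropWhile
    have hbis : pvBis seen x 0 seen.length = P.length := pvBis_eq seen x hs
    have hPGlen : P.length + G.length = seen.length := by
      rw [← List.length_append, hPS]
    have hcount : pvInversions p + ((seen.length : Int) - (P.length : Int))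
        = pvInversions (p ++ [x]) := by
      have h1 : seen.countP (fun y => decide (x < y)) = G.length := countP_gt_eq x hs
      have h2 : seen.countP (fun y => decide (x < y)) = p.countP (fun y => decide (x < y)) :=
        (isortL_perm p).countP_eq _
      rw [pvInversions_snoc]
      omega
    have hins : PySem.List.insert seen ((P.length : Nat) : Int) x = isortL (p ++ [x]) := by
      rw [PySem.List.insert_natCast seen P.length x (by omega)]
      rw [isortL_append_singleton, ← hseen]
      unfold insL
      rw [← hPdef, ← hGdef, ← hPS, List.take_left, List.drop_left]
    simp only [] at *
    rw [hbis, hcount, hins, ih (p ++ [x])]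
    simp

theorem pvInvAlt_eq (c : List Int) : pvInversionsAlt c = pvInversions c := by
  have h := pvInvAlt_state c []
  unfold pvInversionsAlt
  have h0 : pvInversions ([] : List Int) = 0 := rfl
  have h1 : isortL ([] : List Int) = [] := rfl
  rw [h0, h1] at h
  rw [h]
  simp

theorem sorted_eq_isortL (c : List Int) :
    PySem.List.sorted c (fun x => x) false = isortL c :=
  PySem.List.sorted_id_eq_of_perm_of_pairwise c (isortL c) (isortL_perm c) (isortL_pairwise c)

theorem pvPassA_eq (gap n : Nat) (hg : 0 < gap) (hn : 2 * gap ≤ n)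
    (arr0 : List Int) (comp0 : Int) (hlen0 : arr0.length = n) :
    pvPassA gap n hg (arr0, comp0) = pvPassB gap n arr0 comp0 ∧
    (pvPassB gap n arr0 comp0).1.length = n := by
  have hlenB : (pvPassB gap n arr0 comp0).1.length = n := by
    simp [pvPassB]
  refine ⟨?_, hlenB⟩
  obtain ⟨a, hfold, hlena, hch⟩ :=
    pvPassA_inv gap n hg hn arr0 comp0 hlen0 n (by omega) (le_refl n)
  have hcntfull : ∀ r, r < gap → pvCnt gap r n = (pvSlice arr0 r gap).length := by
    intro r hr
    rw [length_pvSlice, hlen0]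
  have hchfull : ∀ r, r < gap → pvSlice a r gap = isortL (pvSlice arr0 r gap) := by
    intro r hr
    rw [hch r hr, hcntfull r hr]
    simp
  have hinvfull : ∀ r, r < gap →
      pvInversions ((pvSlice arr0 r gap).take (pvCnt gap r n)) = pvInversions (pvSlice arr0 r gap) := by
    intro r hr
    rw [hcntfull r hr]
    simp
  unfold pvPassA pvPassB
  rw [hfold]
  rw [Prod.mk.injEq]
  constructor
  · -- arrays agree
    apply List.ext_getElem
    · simp [hlena]
    · intro idx h1 h2
      simp only [List.getElem_map, List.getElem_range, List.map_map]
      rw [hlena] at h1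
      have hrm : idx % gap < gap := Nat.mod_lt _ hg
      rw [getD_map_range hrm]
      simp only [Function.comp]
      rw [sorted_eq_isortL, ← hchfull _ hrm]
      have hidx : (idx / gap) * gap + idx % gap = idx := by
        have h := Nat.div_add_mod idx gap
        rw [Nat.mul_comm] at h
        omega
      have hcnt : idx / gap < pvCnt gap (idx % gap) a.length := by
        rw [hlena]
        exact (pvCnt_iff hg hrm n _).mp (by rw [hidx]; exact h1)
      rw [getD_pvSlice hcnt, hidx]
      exact (List.getD_eq_getElem a 0 (by rw [hlena]; exact h1)).symm
  · -- counters agree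
    rw [List.foldl_map, foldl_add_range]
    congr 1
    apply Finset.sum_congr rfl
    intro r hr
    rw [Finset.mem_range] at hr
    rw [hinvfull r hr, pvInvAlt_eq]



theorem pvLoop_eq (n : Nat) : ∀ gap (st : List Int × Int), 2 * gap ≤ n → st.1.length = n →
    pvLoopA n gap st = pvLoopB n gap st := by
  intro gap
  induction gap using Nat.strong_induction_on with
  | _ gap ih =>
    intro st hgn hlen
    rw [pvLoopA, pvLoopB]
    by_cases hg : 0 < gap
    · rw [dif_pos hg, if_pos hg]
      obtain ⟨hAB, hL⟩ := pvPassA_eq gap n hg hgn st.1 st.2 hlen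
      have hst : (st.1, st.2) = st := rfl
      rw [hst] at hAB
      rw [hAB]
      exact ih (gap / 2) (Nat.div_lt_self hg (by omega)) _ (by omega) hL
    · rw [dif_neg hg, if_neg hg]

-- ===== VERDICT (by name: the statement is the Claim_ definition above) =====
theorem ordenacao_shell_comparacoes_spec : Claim_equal_ordenacao_shell_comparacoes := by
  unfold Claim_equal_ordenacao_shell_comparacoes
  intro arr _
  unfold Spec_ordenacao_shell_comparacoes ordenacao_shell_comparacoes ordenacao_shell_comparacoes_alt
  exact pvLoop_eq arr.length (arr.length / 2) (arr, 0) (by omega) rfl
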